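-- pv_equiv track=rewrite | github.com/ladyeklipse/ZX-Pokemaster | classes/tipshop_scraper.py | find_range
-- ===== SOURCE A (Python) =====
-- def find_range(array, a, b):
--     try:
--         start = array.index(a)
--     except ValueError:
--         return []
--     end = len(array)
--     for each in b:
--         try:
--             end_candidate = array.index(each)
--         except ValueError:
--             continue
--         if end_candidate>-1 and end_candidate<end:
--             end = end_candidate
--     return array[start+1:end]
-- ===== SOURCE B (Python) =====
-- def find_range(array, a, b):
--     # Single forward scan: stop at the first element of array that is in b,
--     # instead of calling array.index for every element of b.
--     if a not in array:
--         return []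
--     start = array.index(a)
--     end = len(array)
--     for i, x in enumerate(array):
--         if x in b:
--             end = i
--             break
--     return array[start + 1:end]
-- ===== Notes on version B (the rewrite author's own statement) =====
-- stated objective: alternative
-- what changed: Replaced A's loop over b with repeated array.index scans (minimised by hand) by one left-to-right pass over array that stops at the first element belonging to b, which equals A's minimum index; measured runtime was about the same.
import Mathlib
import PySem

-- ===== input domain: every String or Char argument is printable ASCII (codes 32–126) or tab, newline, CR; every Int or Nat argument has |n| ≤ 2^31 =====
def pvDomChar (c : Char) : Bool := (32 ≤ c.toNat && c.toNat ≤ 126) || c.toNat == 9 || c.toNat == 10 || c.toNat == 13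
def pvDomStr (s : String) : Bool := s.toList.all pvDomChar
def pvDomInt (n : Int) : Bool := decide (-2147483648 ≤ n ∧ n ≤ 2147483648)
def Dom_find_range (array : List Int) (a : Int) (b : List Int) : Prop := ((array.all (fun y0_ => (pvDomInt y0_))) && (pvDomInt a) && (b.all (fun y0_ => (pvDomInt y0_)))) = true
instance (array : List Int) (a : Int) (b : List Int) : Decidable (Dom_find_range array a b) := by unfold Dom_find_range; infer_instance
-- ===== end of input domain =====

-- B replaces A's repeated array.index scans over b with one forward pass over array
-- stopping at the first element that lies in b (a different single-pass decomposition, same result).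


-- ===== PORT A =====
-- try/except around array.index(a): index? none = ValueError branch → return []
def find_range (array : List Int) (a : Int) (b : List Int) : List Int :=
  match PySem.List.index? array a with
  | none => []
  | some start =>
    let e : Int := b.foldl (fun e each =>
      match PySem.List.index? array each with
      | none => e
      | some ec => if ((ec : Int) > -1 ∧ (ec : Int) < e) then (ec : Int) else e)
      ((array.length : Int))
    PySem.List.slice array (some ((start : Int) + 1)) (some e)

-- ===== PORT B =====
-- the 'for i, x in enumerate(array): if x in b: end = i; break' loop
def pvScanEnd (b : List Int) (pairs : List (Int × Int)) (dflt : Int) : Int :=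
  match pairs with
  | [] => dflt
  | (i, x) :: rest => if b.contains x then i else pvScanEnd b rest dflt

def find_range_alt (array : List Int) (a : Int) (b : List Int) : List Int :=
  if array.contains a then
    match PySem.List.index? array a with
    | none => []
    | some start =>
      let e : Int := pvScanEnd b (PySem.List.enumerate array 0) ((array.length : Int))
      PySem.List.slice array (some ((start : Int) + 1)) (some e)
  else []

-- ===== PRECONDITION & SPEC =====
def Spec_find_range (array : List Int) (a : Int) (b : List Int) (out : List Int) : Prop := out = find_range_alt array a b
instance (array : List Int) (a : Int) (b : List Int) (out : List Int) : Decidable (Spec_find_range array a b out) := by unfold Spec_find_range; infer_instance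

-- ===== CLAIM (what is proved, stated in full; the proofs are below) =====
def Claim_equal_find_range : Prop := ∀ (array : List Int) (a : Int) (b : List Int), Dom_find_range array a b → Spec_find_range array a b (find_range array a b)

-- ===== LEMMAS AND PROOFS =====

-- the A-side fold body
def pvStep (array : List Int) (e : Int) (each : Int) : Int :=
  match PySem.List.index? array each with
  | none => e
  | some ec => if ((ec : Int) > -1 ∧ (ec : Int) < e) then (ec : Int) else e

lemma pvFold_mono (array : List Int) (b : List Int) : ∀ e : Int, b.foldl (pvStep array) e ≤ e := by
  induction b with
  | nil => intro e; simp
  | cons hd tl ih =>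
    intro e
    have h1 : pvStep array e hd ≤ e := by
      unfold pvStep
      cases PySem.List.index? array hd with
      | none => simp
      | some ec => simp only []; split <;> omega
    calc (hd :: tl).foldl (pvStep array) e = tl.foldl (pvStep array) (pvStep array e hd) := rfl
      _ ≤ pvStep array e hd := ih _
      _ ≤ e := h1

lemma pvFold_lower (array : List Int) (b : List Int) (c : Int)
    (hb : ∀ each ∈ b, ∀ k, PySem.List.index? array each = some k → c ≤ (k : Int)) :
    ∀ e : Int, c ≤ e → c ≤ b.foldl (pvStep array) e := by
  induction b with
  | nil => intro e he; simpa using he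
  | cons hd tl ih =>
    intro e he
    have hstep : c ≤ pvStep array e hd := by
      unfold pvStep
      cases h : PySem.List.index? array hd with
      | none => simpa using he
      | some ec =>
        have := hb hd (by simp) ec h
        simp only []; split <;> omega
    exact ih (fun each hm k hk => hb each (by simp [hm]) k hk) _ hstep

lemma pvFold_upper (array : List Int) (b : List Int) (each : Int) (k : Nat)
    (hm : each ∈ b) (hk : PySem.List.index? array each = some k) :
    ∀ e : Int, b.foldl (pvStep array) e ≤ (k : Int) := by
  induction b with
  | nil => cases hm
  | cons hd tl ih =>
    intro e
    rcases List.mem_cons.mp hm with h | h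
    · subst h
      have h1 : pvStep array e each ≤ (k : Int) := by
        unfold pvStep
        rw [hk]
        simp only []; split <;> omega
      calc (each :: tl).foldl (pvStep array) e = tl.foldl (pvStep array) (pvStep array e each) := rfl
        _ ≤ pvStep array e each := pvFold_mono array tl _
        _ ≤ (k : Int) := h1
    · exact ih h _

-- B-side scan = findIdx of membership in b
lemma pvScanEnd_eq_findIdx (b : List Int) (array : List Int) :
    ∀ (s e : Int), pvScanEnd b (PySem.List.enumerate array s) e =
      if array.findIdx (fun x => decide (x ∈ b)) < array.length
      then s + (array.findIdx (fun x => decide (x ∈ b)) : Int) else e := by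
  induction array with
  | nil => intro s e; simp [pvScanEnd, PySem.List.enumerate_nil]
  | cons x xs ih =>
    intro s e
    rw [PySem.List.enumerate_cons, List.findIdx_cons]
    show (if b.contains x then s else pvScanEnd b (PySem.List.enumerate xs (s + 1)) e) = _
    by_cases hx : x ∈ b
    · rw [if_pos (by simpa using hx)]
      simp [hx]
    · rw [if_neg (by simpa using hx), ih (s + 1) e]
      simp only [hx, decide_false, cond_false, List.length_cons]
      by_cases hlt : xs.findIdx (fun x => decide (x ∈ b)) < xs.length
      · rw [if_pos hlt, if_pos (by omega)]; push_cast; ring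
      · rw [if_neg hlt, if_neg (by omega)]

-- a value in b occurring at index i bounds findIdx from above
lemma pvFindIdx_le (b : List Int) (xs : List Int) (i : Nat) (h : i < xs.length)
    (hp : xs[i] ∈ b) : xs.findIdx (fun x => decide (x ∈ b)) ≤ i := by
  by_contra hgt
  have hf := List.not_of_lt_findIdx (xs := xs) (p := fun x => decide (x ∈ b)) (i := i) (by omega)
  exact absurd hp (by simpa using hf)

-- A's fold equals B's scan result: both are the first index of array whose element is in b
lemma pvEnds_eq (array b : List Int) :
    b.foldl (pvStep array) ((array.length : Int)) =
    pvScanEnd b (PySem.List.enumerate array 0) ((array.length : Int)) := by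
  set F : Nat := array.findIdx (fun x => decide (x ∈ b)) with hF
  have hFle : F ≤ array.length := List.findIdx_le_length
  rw [pvScanEnd_eq_findIdx, ← hF]
  have hlower : (F : Int) ≤ b.foldl (pvStep array) ((array.length : Int)) := by
    apply pvFold_lower
    · intro each hm k hk
      obtain ⟨hklt, hget, _⟩ := PySem.List.getElem_of_index?_eq_some hk
      have : F ≤ k := pvFindIdx_le b array k hklt (by rw [hget]; exact hm)
      exact_mod_cast this
    · exact_mod_cast hFle
  by_cases hFlt : F < array.length
  · have hpF : (array[F]'hFlt) ∈ b := by
      have := List.findIdx_getElem (p := fun x => decide (x ∈ b)) (xs := array) (w := hFlt)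
      simpa using this
    have harr : array[F]'hFlt ∈ array := List.getElem_mem hFlt
    obtain ⟨k, hk⟩ := Option.isSome_iff_exists.mp
      ((PySem.List.index?_isSome_iff array _).mpr harr)
    obtain ⟨hklt, hget, hfirst⟩ := PySem.List.getElem_of_index?_eq_some hk
    have hkF : k ≤ F := by
      by_contra hgt
      exact hfirst F (by omega) rfl
    have hupper := pvFold_upper array b _ k hpF hk ((array.length : Int))
    rw [if_pos hFlt]
    omega
  · have hFeq : F = array.length := by omega
    have hupper := pvFold_mono array b ((array.length : Int))
    rw [if_neg hFlt]
    omega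

-- ===== VERDICT (by name: the statement is the Claim_ definition above) =====
theorem find_range_spec : Claim_equal_find_range := by
  intro array a b _
  unfold Spec_find_range find_range find_range_alt
  by_cases hmem : a ∈ array
  · rw [if_pos (by simpa using hmem)]
    cases h : PySem.List.index? array a with
    | none =>
      exfalso
      have hs := (PySem.List.index?_isSome_iff array a).mpr hmem
      rw [h] at hs; cases hs
    | some start =>
      have he := pvEnds_eq array b
      unfold pvStep at he
      rw [he]
  · rw [if_neg (by simpa using hmem)]
    rw [(PySem.List.index?_eq_none_iff array a).mpr hmem]
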